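-- pv_equiv track=rewrite | github.com/MJk357/Engeto_project_02 | projekt_2.py | over_cislo
-- ===== SOURCE A (Python) =====
-- pocet_cifer = 4
--
-- def over_cislo(vstupni_cislo: str) -> bool:
--     """
--     Ověří korektnost zadávaného čísla
--     jestli má správnou délku, nezačíná nulou, obsahuje jen čísla a
--     neobsahuje duplicita
--     :param vstupni_cislo: číslo ve formátu str
--     :return: bool (True/False)
--     """
--     #delka
--     if len(vstupni_cislo) != pocet_cifer:
--         return False
--     #nula na začátku
--     if vstupni_cislo.startswith('0'):
--         return False
--     for i in range(len(vstupni_cislo)):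
--         #jen numeric
--         if not vstupni_cislo[i].isdigit():
--             return False
--         #duplicita
--         if vstupni_cislo[i] in vstupni_cislo[i + 1:len(vstupni_cislo) + 1]:
--             return False
--     return True
-- ===== SOURCE B (Python) =====
-- def over_cislo(vstupni_cislo: str) -> bool:
--     """
--     Ověří korektnost zadávaného čísla (see A): correct length, no leading
--     zero, digits only, no duplicate digits.
--     """
--     return (len(vstupni_cislo) == 4
--             and not vstupni_cislo.startswith('0')
--             and vstupni_cislo.isdigit()
--             and len(set(vstupni_cislo)) == len(vstupni_cislo))
-- ===== Notes on version B (the rewrite author's own statement) =====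
-- stated objective: simpler
-- what changed: Replaced the explicit index loop with its O(n^2) per-character digit test and inner membership scan over a slice by a single returned conjunction of whole-string checks (length, startswith, isdigit, and a set-based duplicate test).
import Mathlib
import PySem

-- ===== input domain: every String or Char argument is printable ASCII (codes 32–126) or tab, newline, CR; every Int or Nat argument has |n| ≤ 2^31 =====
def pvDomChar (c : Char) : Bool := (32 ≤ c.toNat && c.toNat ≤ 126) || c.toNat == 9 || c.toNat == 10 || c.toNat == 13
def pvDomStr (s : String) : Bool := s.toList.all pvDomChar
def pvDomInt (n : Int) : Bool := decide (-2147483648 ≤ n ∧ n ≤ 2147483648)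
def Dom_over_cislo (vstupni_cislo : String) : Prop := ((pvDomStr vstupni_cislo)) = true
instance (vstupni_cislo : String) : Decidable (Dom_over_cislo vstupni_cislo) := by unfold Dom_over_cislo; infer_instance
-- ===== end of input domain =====

-- B replaces A's index loop (per-character digit test plus an inner membership scan of a
-- slice) by a single conjunction of whole-string checks; objective: simpler.

-- ===== PORT A =====
-- A's for-loop with its early returns, as structural recursion over range(len(s))
def overLoopA (cs : List Char) : List Int → Bool
  | [] => true
  | i :: rest =>
    if !(PySem.Chars.isdigit (PySem.List.pyGetD cs i ' ')) then false
    else if PySem.Chars.isIn [PySem.List.pyGetD cs i ' ']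
            (PySem.List.slice cs (some (i + 1)) (some ((cs.length : Int) + 1))) then false
    else overLoopA cs rest

def over_cislo (vstupni_cislo : String) : Bool :=
  if PySem.Str.len vstupni_cislo ≠ 4 then false
  else if PySem.Str.startswith vstupni_cislo "0" then false
  else overLoopA vstupni_cislo.toList
         (PySem.List.pyRange 0 (PySem.Str.len vstupni_cislo) 1)

-- ===== PORT B =====
def over_cislo_alt (vstupni_cislo : String) : Bool :=
  PySem.Str.len vstupni_cislo == 4 &&
  !PySem.Str.startswith vstupni_cislo "0" &&
  PySem.Str.strIsdigit vstupni_cislo &&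
  ((PySem.Set.ofList vstupni_cislo.toList).length == vstupni_cislo.toList.length)

-- ===== PRECONDITION & SPEC =====
def Spec_over_cislo (vstupni_cislo : String) (out : Bool) : Prop := out = over_cislo_alt vstupni_cislo
instance (vstupni_cislo : String) (out : Bool) : Decidable (Spec_over_cislo vstupni_cislo out) := by unfold Spec_over_cislo; infer_instance

-- ===== CLAIM (what is proved, stated in full; the proofs are below) =====
def Claim_equal_over_cislo : Prop := ∀ (vstupni_cislo : String), Dom_over_cislo vstupni_cislo → Spec_over_cislo vstupni_cislo (over_cislo vstupni_cislo)

-- ===== LEMMAS AND PROOFS =====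

theorem singleton_infix_iff {x : Char} {l : List Char} : [x] <:+: l ↔ x ∈ l := by
  constructor
  · intro h; exact h.subset (List.mem_singleton_self x)
  · intro h
    obtain ⟨s, t, rfl⟩ := List.append_of_mem h
    exact ⟨s, t, by simp⟩

-- 'ch in s' for a single character is list membership
theorem isIn_singleton (x : Char) (l : List Char) : PySem.Chars.isIn [x] l = l.contains x := by
  by_cases h : x ∈ l
  · rw [(PySem.Chars.isIn_iff_infix [x] l).mpr (singleton_infix_iff.mpr h)]
    simp [h]
  · rw [(PySem.Chars.isIn_eq_false_iff [x] l).mpr (fun hc => h (singleton_infix_iff.mp hc))]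
    simp [h]

-- A's loop over a 4-character string, fully unrolled
theorem loop4 (a b c d : Char) :
    overLoopA [a,b,c,d] [0,1,2,3] =
      (if !(PySem.Chars.isdigit a) then false
       else if ([b,c,d] : List Char).contains a then false
       else if !(PySem.Chars.isdigit b) then false
       else if ([c,d] : List Char).contains b then false
       else if !(PySem.Chars.isdigit c) then false
       else if ([d] : List Char).contains c then false
       else if !(PySem.Chars.isdigit d) then false
       else if ([] : List Char).contains d then false
       else true) := by
  have g0 : PySem.List.pyGetD [a,b,c,d] (0:Int) ' ' = a := rfl
  have g1 : PySem.List.pyGetD [a,b,c,d] (1:Int) ' ' = b := rfl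
  have g2 : PySem.List.pyGetD [a,b,c,d] (2:Int) ' ' = c := rfl
  have g3 : PySem.List.pyGetD [a,b,c,d] (3:Int) ' ' = d := rfl
  have s0 : PySem.List.slice [a,b,c,d] (some ((0:Int) + 1)) (some ((([a,b,c,d] : List Char).length : Int) + 1)) = [b,c,d] := rfl
  have s1 : PySem.List.slice [a,b,c,d] (some ((1:Int) + 1)) (some ((([a,b,c,d] : List Char).length : Int) + 1)) = [c,d] := rfl
  have s2 : PySem.List.slice [a,b,c,d] (some ((2:Int) + 1)) (some ((([a,b,c,d] : List Char).length : Int) + 1)) = [d] := rfl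
  have s3 : PySem.List.slice [a,b,c,d] (some ((3:Int) + 1)) (some ((([a,b,c,d] : List Char).length : Int) + 1)) = [] := rfl
  simp only [overLoopA, g0, g1, g2, g3, s0, s1, s2, s3, isIn_singleton]

-- ===== VERDICT (by name: the statement is the Claim_ definition above) =====
theorem over_cislo_spec : Claim_equal_over_cislo := by
  intro s _
  unfold Spec_over_cislo over_cislo over_cislo_alt
  have hr : PySem.List.pyRange 0 4 1 = [0,1,2,3] := by decide
  rcases hl : s.toList with _ | ⟨a, _ | ⟨b, _ | ⟨c, _ | ⟨d, _ | ⟨e, tl⟩⟩⟩⟩⟩ <;>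
    simp only [PySem.Str.len_eq, PySem.Str.startswith_eq, PySem.Str.strIsdigit_eq, hl]
  · simp
  · simp
  · simp
  · simp
  · rw [show ((([a,b,c,d] : List Char).length : Int)) = 4 by simp, if_neg (by simp), hr,
       loop4]
    by_cases h0 : PySem.Chars.startswith [a,b,c,d] ("0".toList)
    · have h0' : PySem.Chars.startswith [a,b,c,d] ['0'] = true := h0
      simp [h0']
    · have h0' : PySem.Chars.startswith [a,b,c,d] ['0'] = false := by
        have := h0; rwa [Bool.not_eq_true] at this
      simp [h0']
      by_cases hab : a = b <;> by_cases hac : a = c <;> by_cases had : a = d <;>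
        by_cases hbc : b = c <;> by_cases hbd : b = d <;> by_cases hcd : c = d <;>
        simp_all [PySem.Chars.strIsdigit, PySem.Set.ofList, PySem.Set.add] <;> intros <;>
        (try split_ifs) <;> (try simp_all) <;> (try aesop)
  · have hne : ¬ ((((a :: b :: c :: d :: e :: tl).length : Nat) : Int) = 4) := by
      simp; omega
    rw [if_pos hne]
    simp
    intros
    omega
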